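-- pv_equiv track=rewrite | github.com/TodayOdious/odiville-site | scripts/scan-contracts.py | guess_project
-- ===== SOURCE A (Python) =====
-- def guess_project(contract_name, contract_symbol=""):
--     n = (contract_name + " " + contract_symbol).lower()
--     if "whisper" in n:
--         return "whispers", "Whispers"
--     if "ticket" in n or "owt" in n:
--         return "owt", "One-Way Ticket"
--     if any(k in n for k in ["duu", "book", "odiville", "key", "fragment", "arrival", "today", "puppet"]):
--         return "duu", "The Book"
--     return "duu", "The Book"  # default
-- ===== SOURCE B (Python) =====
-- def guess_project(contract_name, contract_symbol=""):
--     # Single left-to-right sweep over the haystack: at each position record the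
--     # best (lowest) priority of any keyword starting there, then map the final
--     # priority to its project pair.  No repeated substring searches.
--     n = (contract_name + " " + contract_symbol).lower()
--     best = 2
--     for i in range(len(n)):
--         if n.startswith("whisper", i):
--             best = 0
--             break  # top priority, nothing can beat it
--         if best > 1 and (n.startswith("ticket", i) or n.startswith("owt", i)):
--             best = 1
--     table = [("whispers", "Whispers"), ("owt", "One-Way Ticket"), ("duu", "The Book")]
--     return table[best]
-- ===== Notes on version B (the rewrite author's own statement) =====
-- stated objective: alternative
-- what changed: B replaces A's chain of independent substring searches (one full scan per keyword, plus a redundant third branch equal to the default) with one single left-to-right sweep that tracks the minimum priority of any keyword starting at each position, then maps that priority through a table.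
import Mathlib
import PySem

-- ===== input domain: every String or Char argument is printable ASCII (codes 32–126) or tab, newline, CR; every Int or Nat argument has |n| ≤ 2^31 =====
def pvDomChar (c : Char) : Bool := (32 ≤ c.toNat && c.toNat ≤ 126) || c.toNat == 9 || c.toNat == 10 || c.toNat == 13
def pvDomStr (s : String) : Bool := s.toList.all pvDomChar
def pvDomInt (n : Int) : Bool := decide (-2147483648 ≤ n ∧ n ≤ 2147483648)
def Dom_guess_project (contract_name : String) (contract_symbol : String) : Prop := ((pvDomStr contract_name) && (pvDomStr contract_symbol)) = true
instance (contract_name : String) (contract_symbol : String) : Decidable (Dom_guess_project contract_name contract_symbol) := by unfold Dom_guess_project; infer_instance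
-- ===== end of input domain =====

-- B replaces A's per-keyword substring searches with one left-to-right sweep tracking the minimum keyword priority; same result.

-- ===== PORT A =====
def guess_project (contract_name : String) (contract_symbol : String) : String × String :=
  let n := PySem.Str.lower (contract_name ++ " " ++ contract_symbol)
  if PySem.Str.isIn "whisper" n then ("whispers", "Whispers")
  else if PySem.Str.isIn "ticket" n || PySem.Str.isIn "owt" n then ("owt", "One-Way Ticket")
  else if ["duu", "book", "odiville", "key", "fragment", "arrival", "today", "puppet"].any
      (fun k => PySem.Str.isIn k n) then ("duu", "The Book")
  else ("duu", "The Book")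

-- ===== PORT B =====
-- the sweep: at each suffix (= position i), test which keyword starts here;
-- 'break' on priority 0, otherwise keep the running minimum in 'best'
def gpScan : List Char → Nat → Nat
  | [], best => best
  | s@(_ :: rest), best =>
    if "whisper".toList.isPrefixOf s then 0
    else gpScan rest
      (if decide (best > 1) && ("ticket".toList.isPrefixOf s || "owt".toList.isPrefixOf s)
       then 1 else best)

def gpTable : List (String × String) :=
  [("whispers", "Whispers"), ("owt", "One-Way Ticket"), ("duu", "The Book")]

def guess_project_alt (contract_name : String) (contract_symbol : String) : String × String :=
  let n := PySem.Str.lower (contract_name ++ " " ++ contract_symbol)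
  -- table[best]: the index is always 0, 1 or 2, so the getD default is never used
  gpTable.getD (gpScan n.toList 2) ("duu", "The Book")

-- ===== PRECONDITION & SPEC =====
def Spec_guess_project (contract_name : String) (contract_symbol : String) (out : String × String) : Prop := out = guess_project_alt contract_name contract_symbol
instance (contract_name : String) (contract_symbol : String) (out : String × String) : Decidable (Spec_guess_project contract_name contract_symbol out) := by unfold Spec_guess_project; infer_instance

-- ===== CLAIM (what is proved, stated in full; the proofs are below) =====
def Claim_equal_guess_project : Prop := ∀ (contract_name : String) (contract_symbol : String), Dom_guess_project contract_name contract_symbol → Spec_guess_project contract_name contract_symbol (guess_project contract_name contract_symbol)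

-- ===== LEMMAS AND PROOFS =====
-- the sweep computes: 0 if "whisper" occurs, else 1 if best=1 or ticket/owt occurs, else best
theorem gpScan_eq (s : List Char) (best : Nat) (hb : best = 1 ∨ best = 2) :
    gpScan s best =
      if "whisper".toList <:+: s then 0
      else if best = 1 ∨ "ticket".toList <:+: s ∨ "owt".toList <:+: s then 1
      else best := by
  induction s generalizing best with
  | nil => rcases hb with h | h <;> subst h <;> decide
  | cons c rest ih =>
    simp only [gpScan]
    by_cases hw : "whisper".toList.isPrefixOf (c :: rest)
    · rw [if_pos hw, if_pos (List.infix_cons_iff.mpr (Or.inl (List.isPrefixOf_iff_prefix.mp hw)))]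
    · have hwc : ("whisper".toList <:+: c :: rest) ↔ ("whisper".toList <:+: rest) := by
        rw [List.infix_cons_iff]
        constructor
        · rintro (h | h)
          · exact absurd (List.isPrefixOf_iff_prefix.mpr h) hw
          · exact h
        · exact Or.inr
      rw [if_neg hw]
      rcases hb with h | h <;> subst h
      · -- best = 1: the updated accumulator is 1 either way, and both inner ifs fire
        rw [ite_self, ih 1 (Or.inl rfl), if_congr hwc rfl rfl,
            if_pos (Or.inl rfl), if_pos (Or.inl rfl)]
      · -- best = 2: split on whether ticket/owt starts at this position
        cases hX : ("ticket".toList.isPrefixOf (c :: rest) || "owt".toList.isPrefixOf (c :: rest)) with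
        | true =>
          have hor : ("ticket".toList <+: c :: rest) ∨ ("owt".toList <+: c :: rest) := by
            rcases Bool.or_eq_true_iff.mp hX with h | h
            · exact Or.inl (List.isPrefixOf_iff_prefix.mp h)
            · exact Or.inr (List.isPrefixOf_iff_prefix.mp h)
          have hleft : (2 : Nat) = 1 ∨ ("ticket".toList <:+: c :: rest) ∨ ("owt".toList <:+: c :: rest) := by
            rcases hor with h | h
            · exact Or.inr (Or.inl (List.infix_cons_iff.mpr (Or.inl h)))
            · exact Or.inr (Or.inr (List.infix_cons_iff.mpr (Or.inl h)))
          rw [if_pos (by decide), ih 1 (Or.inl rfl), if_congr hwc rfl rfl]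
          by_cases hwr : "whisper".toList <:+: rest
          · rw [if_pos hwr, if_pos hwr]
          · rw [if_neg hwr, if_neg hwr, if_pos (Or.inl rfl), if_pos hleft]
        | false =>
          have hns : ∀ w : List Char, w.isPrefixOf (c :: rest) = false →
              ((w <:+: c :: rest) ↔ (w <:+: rest)) := by
            intro w hwp
            rw [List.infix_cons_iff]
            constructor
            · rintro (h | h)
              · rw [List.isPrefixOf_iff_prefix.mpr h] at hwp; cases hwp
              · exact h
            · exact Or.inr
          rcases Bool.or_eq_false_iff.mp hX with ⟨ht0, ho0⟩
          have hiff : ((2 : Nat) = 1 ∨ ("ticket".toList <:+: c :: rest) ∨ ("owt".toList <:+: c :: rest)) ↔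
              ((2 : Nat) = 1 ∨ ("ticket".toList <:+: rest) ∨ ("owt".toList <:+: rest)) := by
            rw [hns _ ht0, hns _ ho0]
          rw [if_neg (by simp), ih 2 (Or.inr rfl), if_congr hwc rfl rfl, if_congr hiff.symm rfl rfl]

theorem gp_core (n : String) :
    (if PySem.Str.isIn "whisper" n then (("whispers", "Whispers") : String × String)
     else if PySem.Str.isIn "ticket" n || PySem.Str.isIn "owt" n then ("owt", "One-Way Ticket")
     else if ["duu", "book", "odiville", "key", "fragment", "arrival", "today", "puppet"].any
         (fun k => PySem.Str.isIn k n) then ("duu", "The Book")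
     else ("duu", "The Book"))
    = gpTable.getD (gpScan n.toList 2) ("duu", "The Book") := by
  rw [gpScan_eq n.toList 2 (Or.inr rfl)]
  by_cases hw : "whisper".toList <:+: n.toList
  · rw [if_pos hw, if_pos ((PySem.Str.isIn_iff_infix "whisper" n).mpr hw)]
    rfl
  · have hw' : ¬ (PySem.Str.isIn "whisper" n = true) := fun h =>
      hw ((PySem.Str.isIn_iff_infix "whisper" n).mp h)
    rw [if_neg hw, if_neg hw']
    by_cases ht : ("ticket".toList <:+: n.toList) ∨ ("owt".toList <:+: n.toList)
    · have hb : (PySem.Str.isIn "ticket" n || PySem.Str.isIn "owt" n) = true := by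
        rcases ht with h | h
        · rw [(PySem.Str.isIn_iff_infix "ticket" n).mpr h, Bool.true_or]
        · rw [(PySem.Str.isIn_iff_infix "owt" n).mpr h, Bool.or_true]
      rw [if_pos hb, if_pos (Or.inr ht)]
      rfl
    · have hb : ¬ ((PySem.Str.isIn "ticket" n || PySem.Str.isIn "owt" n) = true) := by
        intro h
        rcases Bool.or_eq_true_iff.mp h with h | h
        · exact ht (Or.inl ((PySem.Str.isIn_iff_infix "ticket" n).mp h))
        · exact ht (Or.inr ((PySem.Str.isIn_iff_infix "owt" n).mp h))
      have h2 : (if (2 : Nat) = 1 ∨ ("ticket".toList <:+: n.toList) ∨ ("owt".toList <:+: n.toList) then (1 : Nat) else 2) = 2 := by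
        rw [if_neg]
        rintro (h | h)
        · omega
        · exact ht h
      rw [if_neg hb, h2]
      by_cases h3 : (["duu", "book", "odiville", "key", "fragment", "arrival", "today", "puppet"].any
          (fun k => PySem.Str.isIn k n)) = true
      · rw [if_pos h3]; rfl
      · rw [if_neg h3]; rfl

theorem gp_eq (cn cs : String) : guess_project cn cs = guess_project_alt cn cs :=
  gp_core (PySem.Str.lower (cn ++ " " ++ cs))

-- ===== VERDICT (by name: the statement is the Claim_ definition above) =====
theorem guess_project_spec : Claim_equal_guess_project := by
  intro cn cs _
  exact gp_eq cn cs
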